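-- pv_equiv track=rewrite | github.com/Lightthouse/ozon-tasks | main_event_tasks/d.py | range_positions
-- ===== SOURCE A (Python) =====
-- def range_positions(data, result_list):
--     position = 1
--     next_position = 1
--     prev_key = -100
--     for current_key, ind in data.items():
--         if not (current_key - prev_key) == 1:
--             position = next_position
--         for i in ind:
--             next_position += 1
--             result_list[i] = str(position)
--         prev_key = current_key
--
--     res = ' '.join(result_list)
--
--     return res
-- ===== SOURCE B (Python) =====
-- def range_positions(data, result_list):
--     # Carve the key sequence into maximal runs of consecutive keys; fill each
--     # run wholesale with a single precomputed rank string (mutates result_list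
--     # in place, like A).
--     items = list(data.items())
--     pos = 0
--     while items:
--         # length of the maximal consecutive-key run at the front
--         n = 1
--         while n < len(items) and items[n][0] - items[n - 1][0] == 1:
--             n += 1
--         run, items = items[:n], items[n:]
--         s = str(pos + 1)
--         for _, ind in run:
--             for i in ind:
--                 result_list[i] = s
--             pos += len(ind)
--     return ' '.join(result_list)
-- ===== Notes on version B (the rewrite author's own statement) =====
-- stated objective: alternative
-- what changed: A is one stateful pass carrying position/next_position and re-stringifying the rank at every element; B instead carves the key sequence into maximal runs of consecutive keys and fills each run wholesale with a single precomputed rank string derived from the count of indices before the run.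
import Mathlib
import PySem

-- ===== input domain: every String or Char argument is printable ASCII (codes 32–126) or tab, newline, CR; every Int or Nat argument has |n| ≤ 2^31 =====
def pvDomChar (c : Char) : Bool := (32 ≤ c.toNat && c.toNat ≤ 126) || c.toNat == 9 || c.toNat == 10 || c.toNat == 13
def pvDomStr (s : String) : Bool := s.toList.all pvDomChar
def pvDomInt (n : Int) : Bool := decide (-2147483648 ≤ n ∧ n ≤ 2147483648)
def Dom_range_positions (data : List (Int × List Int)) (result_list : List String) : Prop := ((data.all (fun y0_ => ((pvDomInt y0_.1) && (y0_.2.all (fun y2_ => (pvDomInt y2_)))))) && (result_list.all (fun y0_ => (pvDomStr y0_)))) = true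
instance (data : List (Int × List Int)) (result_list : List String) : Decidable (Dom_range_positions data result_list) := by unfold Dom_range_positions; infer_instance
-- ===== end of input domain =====

-- B replaces A's single stateful per-group pass (position/next_position carried along, rank
-- re-stringified per element) by a run-carving loop: split off the maximal consecutive-key run,
-- fill it wholesale with one precomputed rank string. Both Pythons mutate result_list in place
-- identically; the equivalence proved here is about the returned string.

-- ===== PORT A =====
-- one step of A's outer for-loop; state = (position, next_position, prev_key, result_list)
def stepA (st : Int × Int × Int × List String) (kv : Int × List Int) : Int × Int × Int × List String :=
  let position := if ¬ (kv.1 - st.2.2.1 = 1) then st.2.1 else st.1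
  let inner := kv.2.foldl (fun (s : Int × List String) i =>
      (s.1 + 1, PySem.List.pySetD s.2 i (PySem.Int.toStr position))) (st.2.1, st.2.2.2)
  (position, inner.1, kv.1, inner.2)

def range_positions (data : List (Int × List Int)) (result_list : List String) : String :=
  let st := ((PySem.Dict.ofList data).items).foldl stepA (1, 1, -100, result_list)
  PySem.Str.join " " st.2.2.2

-- ===== PORT B =====
-- Source B's inner while loop: number of further items whose key continues the run after prev key pk
-- (compares items[n][0] with items[n-1][0], i.e. successive keys)
def runLenAux : Int → List (Int × List Int) → Nat
  | _, [] => 0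
  | pk, (k, _) :: rest => if k - pk = 1 then 1 + runLenAux k rest else 0

-- n computed by Source B's inner while loop: length of the maximal consecutive-key run at the front
def runLen : List (Int × List Int) → Nat
  | [] => 0
  | (k, _) :: rest => 1 + runLenAux k rest

-- one group of Source B's 'for _, ind in run' loop; state = (pos, result_list)
def fillRun (s : String) (st : Int × List String) (kv : Int × List Int) : Int × List String :=
  ((kv.2.foldl (fun rl i => PySem.List.pySetD rl i s) st.2), st.1 + (kv.2.length : Int)).swap

-- Source B's outer while loop
def bLoop : List (Int × List Int) → Int → List String → List String
  | [], _, rl => rl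
  | (k, v) :: rest, pos, rl =>
    let n := runLen ((k, v) :: rest)
    let s := PySem.Int.toStr (pos + 1)
    let st := (((k, v) :: rest).take n).foldl (fillRun s) (pos, rl)
    bLoop (((k, v) :: rest).drop n) st.1 st.2
  termination_by items _ _ => items.length
  decreasing_by simp [runLen]

def range_positions_alt (data : List (Int × List Int)) (result_list : List String) : String :=
  PySem.Str.join " " (bLoop ((PySem.Dict.ofList data).items) 0 result_list)

-- ===== PRECONDITION & SPEC =====
-- Pre_ excludes exactly the inputs on which Python A raises IndexError: some index of a
-- (surviving) dict value is out of range for result_list.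
def Pre_range_positions (data : List (Int × List Int)) (result_list : List String) : Prop :=
  ∀ kv ∈ (PySem.Dict.ofList data).items, ∀ i ∈ kv.2, PySem.Raise.InRange result_list.length i
instance (data : List (Int × List Int)) (result_list : List String) : Decidable (Pre_range_positions data result_list) := by unfold Pre_range_positions; infer_instance

def pvWitness_range_positions : (List (Int × List Int)) × List String :=
  ([(0, [0]), (1, [2]), (5, [1, 0])], ["a", "b", "c"])

def Spec_range_positions (data : List (Int × List Int)) (result_list : List String) (out : String) : Prop := out = range_positions_alt data result_list
instance (data : List (Int × List Int)) (result_list : List String) (out : String) : Decidable (Spec_range_positions data result_list out) := by unfold Spec_range_positions; infer_instance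

-- ===== CLAIM (what is proved, stated in full; the proofs are below) =====
def Claim_equal_range_positions : Prop := ∀ (data : List (Int × List Int)) (result_list : List String), Dom_range_positions data result_list → Pre_range_positions data result_list → Spec_range_positions data result_list (range_positions data result_list)

-- ===== LEMMAS AND PROOFS =====

theorem bLoop_nil (pos : Int) (rl : List String) : bLoop [] pos rl = rl := by
  rw [bLoop]

theorem bLoop_cons (k : Int) (v : List Int) (rest : List (Int × List Int)) (pos : Int)
    (rl : List String) :
    bLoop ((k, v) :: rest) pos rl =
      (let n := runLen ((k, v) :: rest)
       let s := PySem.Int.toStr (pos + 1)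
       let st := (((k, v) :: rest).take n).foldl (fillRun s) (pos, rl)
       bLoop (((k, v) :: rest).drop n) st.1 st.2) := by
  rw [bLoop]

theorem take_one_add {α : Type} (m : Nat) (x : α) (l : List α) :
    List.take (1 + m) (x :: l) = x :: List.take m l := by
  rw [Nat.add_comm]; simp [List.take_succ_cons]

theorem drop_one_add {α : Type} (m : Nat) (x : α) (l : List α) :
    List.drop (1 + m) (x :: l) = List.drop m l := by
  rw [Nat.add_comm]; simp [List.drop_succ_cons]

-- what A's fold computes from a mid-run state: finish the current run (writing position p),
-- then continue as B does (proof helper)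
def contRun (p k : Int) (rest : List (Int × List Int)) (c : Int) (rl : List String) : List String :=
  let m := runLenAux k rest
  let st := (rest.take m).foldl (fillRun (PySem.Int.toStr p)) (c, rl)
  bLoop (rest.drop m) st.1 st.2

theorem innerA (ind : List Int) (v : String) :
    ∀ (np : Int) (rl : List String),
    ind.foldl (fun (s : Int × List String) i => (s.1 + 1, PySem.List.pySetD s.2 i v)) (np, rl)
      = (np + (ind.length : Int), ind.foldl (fun rl i => PySem.List.pySetD rl i v) rl) := by
  induction ind with
  | nil => intro np rl; simp
  | cons i ind ih =>
    intro np rl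
    simp only [List.foldl_cons, ih, List.length_cons]
    have : np + 1 + (ind.length : Int) = np + ((ind.length : Int) + 1) := by ring
    simp [this]

theorem stepA_contRun (rest : List (Int × List Int)) :
    ∀ (k p c : Int) (rl : List String),
    (rest.foldl stepA (p, c + 1, k, rl)).2.2.2 = contRun p k rest c rl := by
  induction rest with
  | nil => intro k p c rl; simp [contRun, runLenAux, bLoop_nil]
  | cons kv rest ih =>
    intro k p c rl
    obtain ⟨k', v'⟩ := kv
    by_cases h : k' - k = 1
    · -- run continues: A keeps position p; B's take/drop absorb this group
      simp only [List.foldl_cons, stepA, if_neg (not_not_intro h), innerA]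
      have hc : c + 1 + (v'.length : Int) = (c + (v'.length : Int)) + 1 := by ring
      rw [hc, ih]
      simp only [contRun, runLenAux, if_pos h, take_one_add, drop_one_add,
        List.foldl_cons, fillRun, Prod.swap]
    · -- run boundary: A sets position := next_position; B starts a fresh bLoop iteration
      simp only [List.foldl_cons, stepA, if_pos h, innerA]
      have hc : c + 1 + (v'.length : Int) = (c + (v'.length : Int)) + 1 := by ring
      rw [hc, ih]
      simp only [contRun, runLenAux, if_neg h, List.take_zero, List.drop_zero, List.foldl_nil]
      rw [bLoop_cons]
      simp only [runLen, take_one_add, drop_one_add, List.foldl_cons, fillRun, Prod.swap]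

theorem contRun_top (items : List (Int × List Int)) (rl : List String) :
    contRun 1 (-100) items 0 rl = bLoop items 0 rl := by
  cases items with
  | nil => simp [contRun, runLenAux, bLoop_nil]
  | cons kv rest =>
    obtain ⟨k, v⟩ := kv
    by_cases h : k - (-100 : Int) = 1
    · -- only key -99: A's position stays 1 = 0 + 1, so the same run fill happens
      rw [bLoop_cons]
      simp only [contRun, runLenAux, if_pos h, runLen, zero_add, take_one_add, drop_one_add]
    · simp only [contRun, runLenAux, if_neg h, List.take_zero, List.drop_zero, List.foldl_nil]

-- ===== VERDICT (by name: the statement is the Claim_ definition above) =====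
theorem range_positions_spec : Claim_equal_range_positions := by
  intro data result_list _ _
  unfold Spec_range_positions range_positions range_positions_alt
  show PySem.Str.join " "
      (((PySem.Dict.ofList data).items).foldl stepA (1, (0 : Int) + 1, -100, result_list)).2.2.2
    = PySem.Str.join " " (bLoop ((PySem.Dict.ofList data).items) 0 result_list)
  rw [stepA_contRun, contRun_top]
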